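-- pv_equiv track=rewrite | github.com/dagger/dagger | sdk/python/src/dagger/mod/_ast_analyzer.py | _parse_enum_member_doc
-- ===== SOURCE A (Python) =====
-- def _parse_enum_member_doc(text: str) -> tuple[str | None, str | None]:
--     """Parse enum member docstring, extracting deprecated directive."""
--     description_lines: list[str] = []
--     deprecated_lines: list[str] = []
--     lines = text.splitlines()
--     it = iter(enumerate(lines))
--
--     for _, raw_line in it:
--         stripped = raw_line.strip()
--         if stripped.startswith(".. deprecated::"):
--             remainder = stripped[len(".. deprecated::"):].strip()
--             if remainder:
--                 deprecated_lines.append(remainder)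
--             # Get continuation lines
--             for _, cont in it:
--                 cont_stripped = cont.strip()
--                 if not cont_stripped:
--                     continue
--                 if cont.startswith(("   ", "\t")):
--                     deprecated_lines.append(cont_stripped)
--                     continue
--                 description_lines.append(cont_stripped)
--                 break
--         else:
--             description_lines.append(stripped)
--
--     description = "\n".join(line for line in description_lines if line).strip() or None
--     deprecated = "\n".join(line for line in deprecated_lines if line).strip() or None
--     return description, deprecated
-- ===== SOURCE B (Python) =====
-- def _parse_enum_member_doc(text: str) -> tuple[str | None, str | None]:
--     """Single flat loop with an in_deprecated state flag instead of nested loops on a shared iterator."""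
--     description_lines: list[str] = []
--     deprecated_lines: list[str] = []
--     in_deprecated = False
--     for raw_line in text.splitlines():
--         stripped = raw_line.strip()
--         if in_deprecated:
--             if not stripped:
--                 continue
--             if raw_line.startswith(("   ", "\t")):
--                 deprecated_lines.append(stripped)
--             else:
--                 description_lines.append(stripped)
--                 in_deprecated = False
--         elif stripped.startswith(".. deprecated::"):
--             deprecated_lines.append(stripped[len(".. deprecated::"):].strip())
--             in_deprecated = True
--         else:
--             description_lines.append(stripped)
--
--     description = "\n".join(line for line in description_lines if line).strip() or None
--     deprecated = "\n".join(line for line in deprecated_lines if line).strip() or None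
--     return description, deprecated
-- ===== Notes on version B (the rewrite author's own statement) =====
-- stated objective: simpler
-- what changed: Replaced A's nested outer/inner loops sharing one iterator with a single flat loop over the lines maintaining an in_deprecated boolean state flag.
import Mathlib
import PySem

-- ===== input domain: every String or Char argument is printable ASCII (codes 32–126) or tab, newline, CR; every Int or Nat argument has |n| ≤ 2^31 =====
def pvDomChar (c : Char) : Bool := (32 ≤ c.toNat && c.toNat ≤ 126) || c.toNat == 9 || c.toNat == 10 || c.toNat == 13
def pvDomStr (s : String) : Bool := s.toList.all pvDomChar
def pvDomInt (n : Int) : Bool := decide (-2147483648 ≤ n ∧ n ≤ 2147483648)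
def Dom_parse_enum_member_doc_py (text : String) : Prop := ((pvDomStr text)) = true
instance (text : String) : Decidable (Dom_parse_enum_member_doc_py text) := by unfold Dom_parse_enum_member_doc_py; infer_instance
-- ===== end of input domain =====

-- B replaces A's nested outer/inner loops over a shared iterator by one flat loop with an
-- in_deprecated boolean state flag (objective: simpler decomposition, same O(n) cost).

-- ===== PORT A =====
-- final '"\n".join(line for line in ls if line).strip() or None' — identical line in both Pythons
def pvFinish (ls : List String) : Option String :=
  let j := PySem.Str.strip (PySem.Str.join "\n" (ls.filter (fun l => l != "")))
  if j == "" then none else some j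

mutual
-- outer 'for _, raw_line in it' loop of A
def pvOuterA : List String → List String → List String → List String × List String
  | [], ds, dp => (ds, dp)
  | raw :: rest, ds, dp =>
    let stripped := PySem.Str.strip raw
    if PySem.Str.startswith stripped ".. deprecated::" then
      let remainder := PySem.Str.strip (PySem.Str.slice stripped (some 15) none)
      pvInnerA rest ds (if remainder != "" then dp ++ [remainder] else dp)
    else
      pvOuterA rest (ds ++ [stripped]) dp
-- inner 'for _, cont in it' continuation loop of A (break returns to the outer loop)
def pvInnerA : List String → List String → List String → List String × List String
  | [], ds, dp => (ds, dp)
  | cont :: rest, ds, dp =>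
    let cs := PySem.Str.strip cont
    if cs == "" then pvInnerA rest ds dp
    else if PySem.Str.startswith cont "   " || PySem.Str.startswith cont "\t" then
      pvInnerA rest ds (dp ++ [cs])
    else
      pvOuterA rest (ds ++ [cs]) dp
end

def parse_enum_member_doc_py (text : String) : Option String × Option String :=
  let r := pvOuterA (PySem.Str.splitlines text) [] []
  (pvFinish r.1, pvFinish r.2)

-- ===== PORT B =====
-- single flat loop of Source B, carrying the in_deprecated flag
def pvLoopB : List String → Bool → List String → List String → List String × List String
  | [], _, ds, dp => (ds, dp)
  | raw :: rest, inDep, ds, dp =>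
    let stripped := PySem.Str.strip raw
    if inDep then
      if stripped == "" then pvLoopB rest true ds dp
      else if PySem.Str.startswith raw "   " || PySem.Str.startswith raw "\t" then
        pvLoopB rest true ds (dp ++ [stripped])
      else
        pvLoopB rest false (ds ++ [stripped]) dp
    else if PySem.Str.startswith stripped ".. deprecated::" then
      pvLoopB rest true ds (dp ++ [PySem.Str.strip (PySem.Str.slice stripped (some 15) none)])
    else
      pvLoopB rest false (ds ++ [stripped]) dp

def parse_enum_member_doc_py_alt (text : String) : Option String × Option String :=
  let r := pvLoopB (PySem.Str.splitlines text) false [] []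
  (pvFinish r.1, pvFinish r.2)

-- ===== PRECONDITION & SPEC =====
def Spec_parse_enum_member_doc_py (text : String) (out : Option String × Option String) : Prop := out = parse_enum_member_doc_py_alt text
instance (text : String) (out : Option String × Option String) : Decidable (Spec_parse_enum_member_doc_py text out) := by unfold Spec_parse_enum_member_doc_py; infer_instance

-- ===== CLAIM (what is proved, stated in full; the proofs are below) =====
def Claim_equal_parse_enum_member_doc_py : Prop := ∀ (text : String), Dom_parse_enum_member_doc_py text → Spec_parse_enum_member_doc_py text (parse_enum_member_doc_py text)

-- ===== LEMMAS AND PROOFS =====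

-- Invariant: description accumulators are equal; deprecated accumulators agree after
-- dropping empty lines (A skips an empty directive remainder, B appends it; pvFinish filters).
theorem pv_main (ls : List String) :
    (∀ ds dpA dpB, dpB.filter (fun l => l != "") = dpA.filter (fun l => l != "") →
      (pvOuterA ls ds dpA).1 = (pvLoopB ls false ds dpB).1 ∧
      (pvOuterA ls ds dpA).2.filter (fun l => l != "") = (pvLoopB ls false ds dpB).2.filter (fun l => l != "")) ∧
    (∀ ds dpA dpB, dpB.filter (fun l => l != "") = dpA.filter (fun l => l != "") →
      (pvInnerA ls ds dpA).1 = (pvLoopB ls true ds dpB).1 ∧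
      (pvInnerA ls ds dpA).2.filter (fun l => l != "") = (pvLoopB ls true ds dpB).2.filter (fun l => l != "")) := by
  induction ls with
  | nil =>
    constructor <;> intro ds dpA dpB h <;> simp [pvOuterA, pvInnerA, pvLoopB, h]
  | cons raw rest ih =>
    constructor
    · intro ds dpA dpB h
      by_cases hd : PySem.Str.startswith (PySem.Str.strip raw) ".. deprecated::" = true
      · simp only [pvOuterA, pvLoopB, hd, if_pos]
        apply ih.2
        by_cases hr : (PySem.Str.strip (PySem.Str.slice (PySem.Str.strip raw) (some 15) none)) != ""
        · simp [hr, List.filter_append, h]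
        · simp only [Bool.not_eq_true] at hr
          simp [hr, List.filter_append, h]
      · simp only [pvOuterA, pvLoopB, hd, if_neg, Bool.false_eq_true, not_false_iff]
        exact ih.1 _ _ _ h
    · intro ds dpA dpB h
      by_cases he : (PySem.Str.strip raw == "") = true
      · simp only [pvInnerA, pvLoopB, he, if_pos]
        exact ih.2 _ _ _ h
      · by_cases hi : (PySem.Str.startswith raw "   " || PySem.Str.startswith raw "\t") = true
        · simp only [pvInnerA, pvLoopB, he, hi, Bool.false_eq_true, if_false, if_true]
          apply ih.2
          simp [List.filter_append, h]
        · simp only [pvInnerA, pvLoopB, he, hi, Bool.false_eq_true, if_false]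
          exact ih.1 _ _ _ h

theorem pv_filter_idem (ls : List String) :
    pvFinish (ls.filter (fun l => l != "")) = pvFinish ls := by
  simp [pvFinish, List.filter_filter]

-- ===== VERDICT (by name: the statement is the Claim_ definition above) =====
theorem parse_enum_member_doc_py_spec : Claim_equal_parse_enum_member_doc_py := by
  intro text _
  unfold Spec_parse_enum_member_doc_py parse_enum_member_doc_py parse_enum_member_doc_py_alt
  obtain ⟨h1, h2⟩ := (pv_main (PySem.Str.splitlines text)).1 [] [] [] rfl
  simp only [h1]
  rw [← pv_filter_idem (pvOuterA (PySem.Str.splitlines text) [] []).2, h2, pv_filter_idem]
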